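-- pv_equiv track=rewrite | github.com/mattblferrer/euler | 401-450/407.py | prime_power_sieve
-- ===== SOURCE A (Python) =====
-- from math import isqrt
--
-- def soe(n: int) -> list:
--     iterlimit = isqrt(n) + 1
--     isPrimeList = [True]*n
--
--     # for 0 and 1
--     isPrimeList[0] = isPrimeList[1] = False
--
--     # for 2 and 3
--     for i in [2, 3]:
--         for multiple in range(i*i, n, i):
--             # assign multiples of 2 or 3 as not being prime
--             isPrimeList[multiple] = False
--
--     # for 6k +- 1
--     for i in range(5, iterlimit+2, 6):
--         for j in [0, 2]:
--             for multiple in range((i+j) * (i+j), n, i+j):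
--                 # assign multiples of i+j as not being prime
--                 isPrimeList[multiple] = False
--
--     return isPrimeList
--
-- def prime_power_sieve(n: int) -> list[int]:
--     sieve = [False]*n
--     is_prime_list = soe(n)
--     prime_list = [i for i, isprime in enumerate(is_prime_list) if isprime]
--
--     for p in prime_list:
--         k = p
--         while k < n:
--             sieve[k] = True
--             k *= p
--
--     return [i for i, x in enumerate(sieve) if not x]
-- ===== SOURCE B (Python) =====
-- def prime_power_sieve(n: int) -> list[int]:
--     cnt = [0] * n
--     for i in range(2, n):
--         if cnt[i] == 0:
--             # no prime below i divides i, so i is prime: count it for all its multiples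
--             for m in range(i, n, i):
--                 cnt[m] += 1
--     return [i for i in range(n) if cnt[i] != 1]
-- ===== Notes on version B (the rewrite author's own statement) =====
-- stated objective: alternative
-- what changed: Instead of A's two-stage method (a 6k±1 sieve of Eratosthenes, then chaining the powers p, p², p³, … of each prime), B runs one additive sieve that counts each number's distinct prime factors (detecting primes inline as numbers with count still 0) and keeps exactly the indices whose count is not 1.
-- outside the precondition, e.g. on prime_power_sieve(0): A raises IndexError, B returns []; on prime_power_sieve(1): A raises IndexError, B returns [0]; on prime_power_sieve(-3): A raises ValueError, B returns []
import Mathlib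
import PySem

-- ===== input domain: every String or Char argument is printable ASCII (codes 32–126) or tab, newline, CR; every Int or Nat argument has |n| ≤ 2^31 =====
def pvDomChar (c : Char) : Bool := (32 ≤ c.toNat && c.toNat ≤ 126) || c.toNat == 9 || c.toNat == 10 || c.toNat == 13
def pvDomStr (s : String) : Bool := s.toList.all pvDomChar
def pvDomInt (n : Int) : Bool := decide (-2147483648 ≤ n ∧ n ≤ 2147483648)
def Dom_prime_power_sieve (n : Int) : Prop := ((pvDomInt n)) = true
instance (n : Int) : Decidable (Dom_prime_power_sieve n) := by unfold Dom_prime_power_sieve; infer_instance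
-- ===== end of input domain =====

-- B replaces A's two-stage method (6k±1 primality sieve, then chaining prime powers p, p², …)
-- by one additive sieve counting distinct prime factors, keeping i exactly when that count ≠ 1
-- (alternative decomposition; equivalence proved for n ≥ 2, where A returns normally).

-- ===== PORT A =====
def soe (n : Int) : List Bool :=
  let iterlimit : Int := Int.sqrt n + 1
  let isPrimeList : List Bool := List.replicate n.toNat true
  let isPrimeList := (isPrimeList.set 0 false).set 1 false
  let isPrimeList := [(2 : Int), 3].foldl
    (fun l i => (PySem.List.pyRange (i * i) n i).foldl (fun l m => l.set m.toNat false) l)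
    isPrimeList
  (PySem.List.pyRange 5 (iterlimit + 2) 6).foldl
    (fun l i => [(0 : Int), 2].foldl
      (fun l j => (PySem.List.pyRange ((i + j) * (i + j)) n (i + j)).foldl
        (fun l m => l.set m.toNat false) l) l)
    isPrimeList

-- "while k < n: sieve[k] = True; k *= p" — fuel only makes the loop total; with p ≥ 2 it is never exhausted
def markPows (n p : Int) : Nat → Int → List Bool → List Bool
  | 0, _, l => l
  | fuel + 1, k, l => if k < n then markPows n p fuel (k * p) (l.set k.toNat true) else l

def prime_power_sieve (n : Int) : List Int :=
  let sieve : List Bool := List.replicate n.toNat false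
  let is_prime_list := soe n
  let prime_list : List Int := (PySem.List.enumerate is_prime_list 0).foldl
    (fun acc x => if x.2 then acc ++ [x.1] else acc) []
  let sieve := prime_list.foldl (fun l p => markPows n p (n.toNat + 1) p l) sieve
  (PySem.List.enumerate sieve 0).foldl (fun acc x => if !x.2 then acc ++ [x.1] else acc) []

-- ===== PORT B =====
def prime_power_sieve_alt (n : Int) : List Int :=
  let cnt : List Int := List.replicate n.toNat 0
  let cnt := (PySem.List.pyRange 2 n 1).foldl
    (fun c i => if PySem.List.pyGetD c i 0 == 0 then
        (PySem.List.pyRange i n i).foldl (fun c m => c.modify m.toNat (· + 1)) c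
      else c)
    cnt
  (PySem.List.pyRange 0 n 1).foldl
    (fun acc i => if PySem.List.pyGetD cnt i 0 != 1 then acc ++ [i] else acc) []

-- ===== PRECONDITION & SPEC =====
-- Pre_ excludes exactly n < 2, where Python A raises (IndexError on the length-n sieve for n = 0, 1;
-- ValueError from isqrt for negative n); it admits every n on which A returns.
def Pre_prime_power_sieve (n : Int) : Prop := 2 ≤ n
instance (n : Int) : Decidable (Pre_prime_power_sieve n) := by unfold Pre_prime_power_sieve; infer_instance
def pvWitness_prime_power_sieve : Int := 10

def Spec_prime_power_sieve (n : Int) (out : List Int) : Prop := out = prime_power_sieve_alt n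
instance (n : Int) (out : List Int) : Decidable (Spec_prime_power_sieve n out) := by unfold Spec_prime_power_sieve; infer_instance

-- ===== CLAIM (what is proved, stated in full; the proofs are below) =====
def Claim_equal_prime_power_sieve : Prop := ∀ (n : Int), Dom_prime_power_sieve n → Pre_prime_power_sieve n → Spec_prime_power_sieve n (prime_power_sieve n)
-- ===== LEMMAS AND PROOFS =====

-- `c*c ≤ m` and `c ∣ m`: m is struck by candidate c's pass of A's sieve of Eratosthenes
def Mk (c m : ℕ) : Prop := c * c ≤ m ∧ c ∣ m

-- membership in one of A's 6k±1 candidate passes (N = n.toNat; iterlimit = √N + 1)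
def BadBy (N m : ℕ) : Prop :=
  Mk 2 m ∨ Mk 3 m ∨ ∃ c : ℕ, 5 ≤ c ∧ c < N.sqrt + 1 + 2 ∧ c % 6 = 5 ∧ (Mk c m ∨ Mk (c + 2) m)

-- number of distinct primes below t dividing m (B's counter)
def pcount (t m : ℕ) : ℕ := ((List.range t).filter (fun p => decide (p.Prime ∧ p ∣ m))).length

-- ---- generic list lemmas ----

theorem foldl_length_inv {α β : Type} (f : List α → β → List α)
    (h : ∀ l b, (f l b).length = l.length) (xs : List β) (l : List α) :
    (xs.foldl f l).length = l.length := by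
  induction xs generalizing l with
  | nil => rfl
  | cons x xs ih => simpa [List.foldl, h] using ih (f l x)

theorem getD_set_false (l : List Bool) (k m : ℕ) :
    ((l.set k false).getD m false) = (l.getD m false && !(k == m)) := by
  simp only [List.getD_eq_getElem?_getD, List.getElem?_set]
  by_cases h : k = m
  · subst h
    by_cases h2 : k < l.length
    · simp [h2]
    · have h3 : l[k]? = none := by simp; omega
      simp [h2]
  · simp [h]

theorem getD_set_true (l : List Bool) (k m : ℕ) :
    ((l.set k true).getD m false) = (l.getD m false || (k == m && decide (m < l.length))) := by
  simp only [List.getD_eq_getElem?_getD, List.getElem?_set]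
  by_cases h : k = m
  · subst h
    by_cases h2 : k < l.length
    · simp [h2]
    · have h3 : l[k]? = none := by simp; omega
      simp [h2]
  · simp [h]

theorem foldl_set_false (idxs : List Int) (l : List Bool) (m : ℕ) :
    ((idxs.foldl (fun l i => l.set i.toNat false) l).getD m false)
      = (l.getD m false && !(idxs.any (fun i => i.toNat == m))) := by
  induction idxs generalizing l with
  | nil => simp
  | cons x xs ih =>
    simp only [List.foldl_cons, List.any_cons, ih, getD_set_false]
    cases h : (x.toNat == m) <;> simp

theorem getD_modify_add (xs : List Int) (k m : ℕ) :
    ((xs.modify k (· + 1)).getD m 0) = xs.getD m 0 + (if k = m ∧ m < xs.length then 1 else 0) := by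
  simp only [List.getD_eq_getElem?_getD, List.getElem?_modify]
  obtain h4 | ⟨v, h4⟩ := Option.eq_none_or_eq_some (xs[m]?)
  · have hlen : ¬ m < xs.length := by
      intro h; exact absurd h4 (by simp [List.getElem?_eq_getElem h])
    simp [hlen]
  · have hlen : m < xs.length := (List.getElem?_eq_some_iff.1 h4).1
    by_cases h : k = m <;> simp [h, hlen]

theorem nodup_pyRange_of_pos (a b s : Int) (hs : 0 < s) : (PySem.List.pyRange a b s).Nodup := by
  rw [PySem.List.pyRange_of_pos a b hs]
  refine List.Nodup.map ?_ (List.nodup_range)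
  intro x y h
  have h2 := add_left_cancel h
  have := mul_left_cancel₀ (by omega : (s:Int) ≠ 0) h2
  exact_mod_cast this

theorem foldl_and_mask {α : Type} (xs : List α) (g : List Bool → α → List Bool) (B : α → ℕ → Bool)
    (h : ∀ l c, c ∈ xs → ∀ m, (g l c).getD m false = (l.getD m false && !(B c m)))
    (l : List Bool) (m : ℕ) :
    ((xs.foldl g l).getD m false) = (l.getD m false && !(xs.any (fun c => B c m))) := by
  induction xs generalizing l with
  | nil => simp
  | cons x xs ih =>
    simp only [List.foldl_cons, List.any_cons]
    rw [ih (fun l c hc m => h l c (List.mem_cons_of_mem _ hc) m), h l x List.mem_cons_self]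
    cases hb : B x m <;> simp

theorem comprehension_eq {γ : Type} (l : List γ) (P : γ → Bool) (d : γ) :
    ((PySem.List.enumerate l 0).foldl (fun acc x => if P x.2 then acc ++ [x.1] else acc) ([] : List Int))
      = ((List.range l.length).filter (fun k => P (l.getD k d))).map (fun k : ℕ => (k : Int)) := by
  rw [PySem.List.enumerate_eq_map_pyRange l d, List.foldl_map]
  simp only []
  rw [PySem.List.foldl_append_if (p := fun j => P (PySem.List.pyGetD l j d)) (f := fun j => j)]
  rw [PySem.List.pyRange_one, List.filter_map]
  simp [Function.comp_def]

-- ---- the soe sieve computes primality ----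

theorem setfold_length (idxs : List Int) (l : List Bool) :
    (idxs.foldl (fun l m => l.set m.toNat false) l).length = l.length :=
  foldl_length_inv _ (fun l b => by simp) idxs l

theorem getD_replicate_true (N m : ℕ) :
    (List.replicate N true).getD m false = decide (m < N) := by
  by_cases h : m < N
  · simp [h]
  · simp only [List.getD_eq_getElem?_getD]
    rw [List.getElem?_eq_none_iff.2 (by simpa using Nat.le_of_not_lt h)]
    simp [h]

theorem soe_length (n : Int) : (soe n).length = n.toNat := by
  simp only [soe]
  rw [foldl_length_inv _ (fun l i => by
    simp only [List.foldl_cons, List.foldl_nil]; rw [setfold_length, setfold_length])]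
  simp only [List.foldl_cons, List.foldl_nil]
  rw [setfold_length, setfold_length]
  simp

theorem soe_getD (n : Int) (hn : 2 ≤ n) (m : ℕ) :
    ((soe n).getD m false = true) ↔ (2 ≤ m ∧ m < n.toNat ∧ ¬ BadBy n.toNat m) := by
  simp only [soe]
  rw [foldl_and_mask _ _
      (fun (c : Int) m => ((PySem.List.pyRange ((c+0)*(c+0)) n (c+0)).any (fun t => t.toNat == m)
        || (PySem.List.pyRange ((c+2)*(c+2)) n (c+2)).any (fun t => t.toNat == m)))
      (fun l c _ m => by
        simp only [List.foldl_cons, List.foldl_nil]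
        rw [foldl_set_false, foldl_set_false]
        cases h1 : (PySem.List.pyRange ((c+0)*(c+0)) n (c+0)).any (fun t => t.toNat == m) <;>
          cases h2 : (PySem.List.pyRange ((c+2)*(c+2)) n (c+2)).any (fun t => t.toNat == m) <;>
            simp)]
  simp only [List.foldl_cons, List.foldl_nil]
  rw [foldl_set_false, foldl_set_false, getD_set_false, getD_set_false, getD_replicate_true]
  have hN : ((n.toNat : Int)) = n := Int.toNat_of_nonneg (by omega)
  have hsqrt : Int.sqrt n = ((n.toNat.sqrt : ℕ) : Int) := by simp [Int.sqrt]
  simp only [Bool.and_eq_true, Bool.not_eq_true', Bool.eq_false_iff, Bool.or_eq_true,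
    decide_eq_true_eq, beq_iff_eq, List.any_eq_true, ne_eq]
  unfold BadBy Mk
  constructor
  · rintro ⟨⟨⟨⟨⟨hmN, h0⟩, h1⟩, h4⟩, h9⟩, hc⟩
    refine ⟨by omega, hmN, ?_⟩
    rintro (⟨hle, hdvd⟩ | ⟨hle, hdvd⟩ | ⟨c, hc5, hcb, hcmod, hMk⟩)
    · exact h4 ⟨(m : Int), (PySem.List.mem_pyRange_iff_of_pos (by omega) _).2 (by omega), by simp⟩
    · exact h9 ⟨(m : Int), (PySem.List.mem_pyRange_iff_of_pos (by omega) _).2 (by omega), by simp⟩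
    · refine hc ⟨(c : Int), (PySem.List.mem_pyRange_iff_of_pos (by omega) _).2 (by rw [hsqrt]; omega), ?_⟩
      rcases hMk with ⟨hle, hdvd⟩ | ⟨hle, hdvd⟩
      · refine Or.inl ⟨(m : Int), (PySem.List.mem_pyRange_iff_of_pos (by omega) _).2
          ⟨by simpa using Int.ofNat_le.2 hle, by omega, ?_⟩, by simp⟩
        have h1 : ((c : Int) + 0) ∣ (m : Int) := by
          simpa using Int.natCast_dvd_natCast.2 hdvd
        have h2 : ((c : Int) + 0) ∣ ((c : Int) + 0) * ((c : Int) + 0) := Dvd.intro _ rfl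
        exact dvd_sub h1 h2
      · refine Or.inr ⟨(m : Int), (PySem.List.mem_pyRange_iff_of_pos (by omega) _).2
          ⟨by simpa using Int.ofNat_le.2 hle, by omega, ?_⟩, by simp⟩
        have h1 : ((c : Int) + 2) ∣ (m : Int) := by
          exact_mod_cast Int.natCast_dvd_natCast.2 hdvd
        have h2 : ((c : Int) + 2) ∣ ((c : Int) + 2) * ((c : Int) + 2) := Dvd.intro _ rfl
        exact dvd_sub h1 h2
  · rintro ⟨h2m, hmN, hbad⟩
    refine ⟨⟨⟨⟨⟨hmN, by omega⟩, by omega⟩, ?_⟩, ?_⟩, ?_⟩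
    · rintro ⟨i, hi, hieq⟩
      rw [PySem.List.mem_pyRange_iff_of_pos (by omega)] at hi
      have : i = (m : Int) := by omega
      subst this
      exact hbad (Or.inl (by omega))
    · rintro ⟨i, hi, hieq⟩
      rw [PySem.List.mem_pyRange_iff_of_pos (by omega)] at hi
      have : i = (m : Int) := by omega
      subst this
      exact hbad (Or.inr (Or.inl (by omega)))
    · rintro ⟨ci, hci, hin⟩
      rw [PySem.List.mem_pyRange_iff_of_pos (by omega), hsqrt] at hci
      set c : ℕ := ci.toNat with hcdef
      have hceq : (c : Int) = ci := Int.toNat_of_nonneg (by omega)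
      refine hbad (Or.inr (Or.inr ⟨c, by omega, by omega, by omega, ?_⟩))
      rcases hin with ⟨t, ht, hteq⟩ | ⟨t, ht, hteq⟩
      · rw [PySem.List.mem_pyRange_iff_of_pos (by omega)] at ht
        have htm : t = (m : Int) := by
          have h0t : 0 ≤ t := le_trans (mul_self_nonneg _) ht.1
          omega
        subst htm
        obtain ⟨ht1, ht2, ht3⟩ := ht
        have hcc : ((c * c : ℕ) : Int) ≤ (m : Int) := by push_cast; rw [hceq]; simpa using ht1
        refine Or.inl ⟨by exact_mod_cast hcc, ?_⟩
        have : (ci + 0) ∣ (m : Int) := by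
          have h2 : (ci + 0) ∣ (ci + 0) * (ci + 0) := Dvd.intro _ rfl
          have := dvd_add ht3 h2
          simpa using this
        rw [← hceq] at this
        exact_mod_cast (by simpa using this : (c : Int) ∣ (m : Int))
      · rw [PySem.List.mem_pyRange_iff_of_pos (by omega)] at ht
        have htm : t = (m : Int) := by
          have h0t : 0 ≤ t := le_trans (mul_self_nonneg _) ht.1
          omega
        subst htm
        obtain ⟨ht1, ht2, ht3⟩ := ht
        have hcc : (((c + 2) * (c + 2) : ℕ) : Int) ≤ (m : Int) := by
          push_cast; rw [hceq]; simpa using ht1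
        refine Or.inr ⟨by exact_mod_cast hcc, ?_⟩
        have hdd : (ci + 2) ∣ (m : Int) := by
          have h2 : (ci + 2) ∣ (ci + 2) * (ci + 2) := Dvd.intro _ rfl
          have := dvd_add ht3 h2
          simpa using this
        have : ((c + 2 : ℕ) : Int) ∣ (m : Int) := by push_cast; rw [hceq]; exact hdd
        exact_mod_cast this

theorem badby_iff (N m : ℕ) (h2 : 2 ≤ m) (hm : m < N) : (¬ BadBy N m) ↔ m.Prime := by
  constructor
  · intro h
    by_contra hnp
    apply h
    have h1 : m ≠ 1 := by omega
    have hqp : m.minFac.Prime := Nat.minFac_prime h1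
    have hqd : m.minFac ∣ m := Nat.minFac_dvd m
    have hqs : m.minFac * m.minFac ≤ m := by
      have h3 := Nat.minFac_sq_le_self (show 0 < m by omega) hnp
      rwa [pow_two] at h3
    have hq2 : 2 ≤ m.minFac := hqp.two_le
    unfold BadBy Mk
    rcases eq_or_ne m.minFac 2 with hq | hq2'
    · exact Or.inl ⟨by rw [← hq]; exact hqs, by rw [← hq]; exact hqd⟩
    rcases eq_or_ne m.minFac 3 with hq | hq3'
    · exact Or.inr (Or.inl ⟨by rw [← hq]; exact hqs, by rw [← hq]; exact hqd⟩)
    have hq4 : m.minFac ≠ 4 := by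
      intro h4; rw [h4] at hqp; norm_num at hqp
    have hq5 : 5 ≤ m.minFac := by omega
    have hnd2 : ¬ (2 ∣ m.minFac) := by
      intro hd
      rcases (hqp.eq_one_or_self_of_dvd 2 hd) with h' | h' <;> omega
    have hnd3 : ¬ (3 ∣ m.minFac) := by
      intro hd
      rcases (hqp.eq_one_or_self_of_dvd 3 hd) with h' | h' <;> omega
    have hqle : m.minFac ≤ N.sqrt := Nat.le_sqrt.2 (by omega)
    have hmod : m.minFac % 6 = 1 ∨ m.minFac % 6 = 5 := by omega
    rcases hmod with hmod | hmod
    · refine Or.inr (Or.inr ⟨m.minFac - 2, by omega, by omega, by omega, Or.inr ?_⟩)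
      have he : m.minFac - 2 + 2 = m.minFac := by omega
      rw [he]
      exact ⟨hqs, hqd⟩
    · exact Or.inr (Or.inr ⟨m.minFac, by omega, by omega, by omega, Or.inl ⟨hqs, hqd⟩⟩)
  · intro hp hbad
    unfold BadBy Mk at hbad
    rcases hbad with ⟨hle, hdvd⟩ | ⟨hle, hdvd⟩ | ⟨c, hc5, _, _, hMk⟩
    · rcases hp.eq_one_or_self_of_dvd 2 hdvd with h' | h' <;> omega
    · rcases hp.eq_one_or_self_of_dvd 3 hdvd with h' | h' <;> omega
    · rcases hMk with ⟨hle, hdvd⟩ | ⟨hle, hdvd⟩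
      · rcases hp.eq_one_or_self_of_dvd c hdvd with h' | h'
        · omega
        · subst h'; nlinarith
      · rcases hp.eq_one_or_self_of_dvd (c + 2) hdvd with h' | h'
        · omega
        · rw [← h'] at hle h2; nlinarith

theorem bool_eq_decide_of_iff {p : Prop} [Decidable p] (b : Bool) (h : b = true ↔ p) :
    b = decide p := by
  cases b
  · exact (decide_eq_false (fun hp => Bool.false_ne_true (h.2 hp))).symm
  · exact (decide_eq_true (h.1 rfl)).symm

theorem soe_getD_prime (n : Int) (hn : 2 ≤ n) (m : ℕ) (hm : m < n.toNat) :
    (soe n).getD m false = decide m.Prime := by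
  apply bool_eq_decide_of_iff
  rw [soe_getD n hn m]
  by_cases h2 : 2 ≤ m
  · constructor
    · rintro ⟨_, _, hb⟩; exact (badby_iff _ _ h2 hm).1 hb
    · intro hp; exact ⟨h2, hm, (badby_iff _ _ h2 hm).2 hp⟩
  · constructor
    · rintro ⟨h, _, _⟩; omega
    · intro hp; exact absurd hp.two_le h2

-- ---- A's prime-power marking ----

theorem markPows_length (n p : Int) (fuel : ℕ) (k : Int) (l : List Bool) :
    (markPows n p fuel k l).length = l.length := by
  induction fuel generalizing k l with
  | zero => rfl
  | succ fuel ih =>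
    rw [markPows]
    split
    · rw [ih]; simp
    · rfl

theorem markPows_getD (n p : Int) (hp : 2 ≤ p) (fuel : ℕ) (k : Int) (l : List Bool)
    (hk : 2 ≤ k) (hl : (l.length : Int) = n) (hfuel : n ≤ k + fuel) (m : ℕ) :
    ((markPows n p fuel k l).getD m false = true
      ↔ l.getD m false = true ∨ ∃ j : ℕ, (m : Int) = k * p ^ j ∧ (m : Int) < n) := by
  induction fuel generalizing k l with
  | zero =>
    rw [markPows]
    constructor
    · exact Or.inl
    · rintro (h | ⟨j, hj1, hj2⟩)
      · exact h
      · exfalso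
        have h1 : (1 : Int) ≤ p ^ j := one_le_pow₀ (by omega)
        have h2 : k ≤ k * p ^ j := le_mul_of_one_le_right (by omega) h1
        omega
  | succ fuel ih =>
    rw [markPows]
    split
    · next hkn =>
      have hkp : k + 2 ≤ k * p := by
        have h1 : k * 2 ≤ k * p :=
          mul_le_mul_of_nonneg_left (by omega) (by omega : (0 : Int) ≤ k)
        omega
      rw [ih (k * p) _ (by omega) (by simpa using hl) (by omega)]
      rw [getD_set_true]
      simp only [Bool.or_eq_true, Bool.and_eq_true, beq_iff_eq, decide_eq_true_eq]
      constructor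
      · rintro ((h | ⟨h1, h2⟩) | ⟨j, hj1, hj2⟩)
        · exact Or.inl h
        · refine Or.inr ⟨0, ?_, by omega⟩
          simp only [pow_zero, mul_one]
          omega
        · refine Or.inr ⟨j + 1, by rw [hj1]; ring, hj2⟩
      · rintro (h | ⟨j, hj1, hj2⟩)
        · exact Or.inl (Or.inl h)
        · cases j with
          | zero =>
            simp only [pow_zero, mul_one] at hj1
            exact Or.inl (Or.inr ⟨by omega, by omega⟩)
          | succ j =>
            exact Or.inr ⟨j, by rw [hj1]; ring, hj2⟩
    · next hkn =>
      constructor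
      · exact Or.inl
      · rintro (h | ⟨j, hj1, hj2⟩)
        · exact h
        · exfalso
          have h1 : (1 : Int) ≤ p ^ j := one_le_pow₀ (by omega)
          have h2 : k ≤ k * p ^ j := le_mul_of_one_le_right (by omega) h1
          omega

theorem foldl_markPows_nat (n : Int) (hn : 2 ≤ n) (qs : List ℕ) (hq : ∀ q ∈ qs, q.Prime)
    (l : List Bool) (hl : (l.length : Int) = n) (m : ℕ) :
    ((qs.foldl (fun (l : List Bool) (q : ℕ) => markPows n (q : Int) (n.toNat + 1) (q : Int) l) l).getD m false = true
      ↔ l.getD m false = true ∨ ∃ q ∈ qs, ∃ j : ℕ, m = q ^ (j + 1) ∧ m < n.toNat) := by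
  have hN : ((n.toNat : Int)) = n := Int.toNat_of_nonneg (by omega)
  induction qs generalizing l with
  | nil => simp
  | cons q qs ih =>
    have hq2 : 2 ≤ q := (hq q List.mem_cons_self).two_le
    simp only [List.foldl_cons]
    have hlen : (((markPows n (q : Int) (n.toNat + 1) (q : Int) l).length : ℕ) : Int) = n := by
      rw [markPows_length]; exact hl
    refine Iff.trans (ih (fun q' hq' => hq q' (List.mem_cons_of_mem _ hq'))
        (markPows n (q : Int) (n.toNat + 1) (q : Int) l) hlen) ?_
    rw [markPows_getD n q (by exact_mod_cast hq2) _ _ _ (by exact_mod_cast hq2) hl (by omega)]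
    constructor
    · rintro ((h | ⟨j, hj1, hj2⟩) | ⟨q', hq', j, hj1, hj2⟩)
      · exact Or.inl h
      · refine Or.inr ⟨q, List.mem_cons_self, j, ?_, by omega⟩
        have : ((q ^ (j + 1) : ℕ) : Int) = (m : Int) := by push_cast; rw [hj1]; ring
        exact_mod_cast this.symm
      · exact Or.inr ⟨q', List.mem_cons_of_mem _ hq', j, hj1, hj2⟩
    · rintro (h | ⟨q', hq', j, hj1, hj2⟩)
      · exact Or.inl (Or.inl h)
      · rcases List.mem_cons.1 hq' with rfl | hq'
        · refine Or.inl (Or.inr ⟨j, ?_, by omega⟩)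
          rw [hj1]; push_cast; ring
        · exact Or.inr ⟨q', hq', j, hj1, hj2⟩

theorem isPP_iff (N m : ℕ) (hm : m < N) :
    ((∃ q, (q ∈ List.range N ∧ q.Prime) ∧ ∃ j : ℕ, m = q ^ (j + 1) ∧ m < N) ↔ IsPrimePow m) := by
  constructor
  · rintro ⟨q, ⟨_, hq⟩, j, rfl, _⟩
    exact ⟨q, j + 1, hq.prime, Nat.succ_pos _, rfl⟩
  · rintro ⟨p, k, hp, hk, rfl⟩
    have hpp : p.Prime := Nat.prime_iff.2 hp
    have hple : p ≤ p ^ k := Nat.le_self_pow (by omega) p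
    have hke : k - 1 + 1 = k := by omega
    exact ⟨p, ⟨List.mem_range.2 (by omega), hpp⟩, k - 1, by rw [hke], hm⟩

theorem getD_replicate_false (N m : ℕ) : (List.replicate N false).getD m false = false := by
  by_cases h : m < N
  · simp [h]
  · simp only [List.getD_eq_getElem?_getD]
    rw [List.getElem?_eq_none_iff.2 (by simpa using Nat.le_of_not_lt h)]
    rfl

theorem comprehension_eq_id (l : List Bool) :
    ((PySem.List.enumerate l 0).foldl (fun acc x => if x.2 then acc ++ [x.1] else acc) ([] : List Int))
      = ((List.range l.length).filter (fun k => l.getD k false)).map (fun k : ℕ => (k : Int)) :=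
  comprehension_eq l (fun b => b) false

theorem comprehension_eq_not (l : List Bool) :
    ((PySem.List.enumerate l 0).foldl (fun acc x => if !x.2 then acc ++ [x.1] else acc) ([] : List Int))
      = ((List.range l.length).filter (fun k => !(l.getD k false))).map (fun k : ℕ => (k : Int)) :=
  comprehension_eq l (fun b => !b) false

theorem portA_eq (n : Int) (hn : 2 ≤ n) :
    prime_power_sieve n
      = ((List.range n.toNat).filter (fun k => decide ¬(k.primeFactors.card = 1))).map
          (fun k : ℕ => (k : Int)) := by
  have hN : ((n.toNat : Int)) = n := Int.toNat_of_nonneg (by omega)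
  simp only [prime_power_sieve]
  rw [comprehension_eq_id (soe n), soe_length]
  have hpl : (List.range n.toNat).filter (fun k => (soe n).getD k false)
      = (List.range n.toNat).filter (fun k => decide k.Prime) :=
    List.filter_congr (fun k hk => soe_getD_prime n hn k (List.mem_range.1 hk))
  rw [hpl, List.foldl_map, comprehension_eq_not]
  have hslen : (((List.range n.toNat).filter (fun k => decide k.Prime)).foldl
      (fun (l : List Bool) (q : ℕ) => markPows n (q : Int) (n.toNat + 1) (q : Int) l)
      (List.replicate n.toNat false)).length = n.toNat := by
    rw [foldl_length_inv _ (fun l q => markPows_length n _ _ _ l)]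
    simp
  rw [hslen]
  refine congrArg _ (List.filter_congr ?_)
  intro k hk
  have hkN : k < n.toNat := List.mem_range.1 hk
  have hchar := foldl_markPows_nat n hn ((List.range n.toNat).filter (fun k => decide k.Prime))
      (fun q hq => of_decide_eq_true (List.mem_filter.1 hq).2)
      (List.replicate n.toNat false) (by simpa using hN) k
  rw [getD_replicate_false] at hchar
  have hiff : (((List.range n.toNat).filter (fun k => decide k.Prime)).foldl
      (fun (l : List Bool) (q : ℕ) => markPows n (q : Int) (n.toNat + 1) (q : Int) l)
      (List.replicate n.toNat false)).getD k false = true ↔ IsPrimePow k := by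
    rw [hchar]
    constructor
    · rintro (h | ⟨q, hq, j, rfl, hlt⟩)
      · cases h
      · have hq' := List.mem_filter.1 hq
        exact (isPP_iff n.toNat _ hkN).1
          ⟨q, ⟨hq'.1, of_decide_eq_true hq'.2⟩, j, rfl, hlt⟩
    · intro h
      obtain ⟨q, ⟨hq1, hq2⟩, j, rfl, hlt⟩ := (isPP_iff n.toNat _ hkN).2 h
      exact Or.inr ⟨q, List.mem_filter.2 ⟨hq1, decide_eq_true hq2⟩, j, rfl, hlt⟩
  have hb := bool_eq_decide_of_iff _ (hiff.trans isPrimePow_iff_card_primeFactors_eq_one)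
  rw [hb]
  by_cases hc : k.primeFactors.card = 1 <;> simp [hc]

-- ---- B's distinct-prime-factor counter ----

theorem foldl_modify_getD (idxs : List Int) (hnd : idxs.Nodup) (hpos : ∀ i ∈ idxs, 0 ≤ i)
    (xs : List Int) (m : ℕ) :
    ((idxs.foldl (fun c t => c.modify t.toNat (· + 1)) xs).getD m 0)
      = xs.getD m 0 + (if (m : Int) ∈ idxs ∧ m < xs.length then 1 else 0) := by
  induction idxs generalizing xs with
  | nil => simp
  | cons t ts ih =>
    simp only [List.foldl_cons, List.mem_cons]
    rw [ih (List.Nodup.of_cons hnd) (fun i hi => hpos i (List.mem_cons_of_mem _ hi))]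
    rw [getD_modify_add]
    have hlen : (xs.modify t.toNat (· + 1)).length = xs.length := List.length_modify ..
    rw [hlen]
    have ht0 : 0 ≤ t := hpos t List.mem_cons_self
    have htm : (t.toNat = m ∧ m < xs.length) ↔ ((m : Int) = t ∧ m < xs.length) := by
      constructor <;> rintro ⟨h1, h2⟩ <;> exact ⟨by omega, h2⟩
    have hts : (m : Int) = t → ¬ ((m : Int) ∈ ts) := by
      rintro rfl hmem
      exact (List.nodup_cons.1 hnd).1 hmem
    by_cases h1 : (m : Int) = t
    · have h2 : ¬ ((m : Int) ∈ ts) := hts h1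
      have htn : t.toNat = m := by omega
      have hnin : t ∉ ts := (List.nodup_cons.1 hnd).1
      by_cases h3 : m < xs.length <;> simp [h1, h3, htn, hnin]
    · have htn : ¬ (t.toNat = m) := fun h => h1 (by omega)
      by_cases h2 : (m : Int) ∈ ts <;> by_cases h3 : m < xs.length <;>
        simp [h1, h2, h3, htn]

theorem pcount_succ (t m : ℕ) :
    pcount (t + 1) m = pcount t m + (if t.Prime ∧ t ∣ m then 1 else 0) := by
  by_cases h : t.Prime ∧ t ∣ m <;>
    simp [pcount, List.range_succ, List.filter_append, h]

theorem pcount_zero_iff (i : ℕ) (h2 : 2 ≤ i) : (pcount i i = 0 ↔ i.Prime) := by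
  rw [pcount, List.length_eq_zero_iff, List.filter_eq_nil_iff]
  constructor
  · intro h
    by_contra hnp
    have h1 : i ≠ 1 := by omega
    have hqp : i.minFac.Prime := Nat.minFac_prime h1
    have hqd : i.minFac ∣ i := Nat.minFac_dvd i
    have hqs : i.minFac * i.minFac ≤ i := by
      have h3 := Nat.minFac_sq_le_self (show 0 < i by omega) hnp
      rwa [pow_two] at h3
    have hq2 : 2 ≤ i.minFac := hqp.two_le
    have hqlt : i.minFac < i := by
      rcases Nat.lt_or_ge i.minFac i with h' | h'
      · exact h'
      · exfalso; nlinarith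
    exact h i.minFac (List.mem_range.2 hqlt) (by simp [hqp, hqd])
  · intro hp p hpr hpand
    rw [decide_eq_true_eq] at hpand
    obtain ⟨hpp, hpd⟩ := hpand
    rcases hp.eq_one_or_self_of_dvd p hpd with h' | h'
    · exact Nat.Prime.one_lt hpp |>.ne' h'
    · exact absurd (List.mem_range.1 hpr) (by omega)

theorem pcount_eq_card (N m : ℕ) (h1 : 1 ≤ m) (hm : m < N) :
    pcount N m = m.primeFactors.card := by
  have hset : m.primeFactors = (Finset.range N).filter (fun p => p.Prime ∧ p ∣ m) := by
    ext p
    simp only [Nat.mem_primeFactors, Finset.mem_filter, Finset.mem_range]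
    constructor
    · rintro ⟨hp, hd, _⟩
      have : p ≤ m := Nat.le_of_dvd (by omega) hd
      exact ⟨by omega, hp, hd⟩
    · rintro ⟨_, hp, hd⟩
      exact ⟨hp, hd, by omega⟩
  rw [hset, pcount]
  rfl

theorem getD_replicate_zero (N m : ℕ) : (List.replicate N (0 : Int)).getD m 0 = 0 := by
  by_cases h : m < N
  · simp [h]
  · simp only [List.getD_eq_getElem?_getD]
    rw [List.getElem?_eq_none_iff.2 (by simpa using Nat.le_of_not_lt h)]
    rfl

theorem cnt_fold (n : Int) (hn : 2 ≤ n) (K : ℕ) (hK : 2 + (K : Int) ≤ n) :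
    ((PySem.List.pyRange 2 (2 + (K : Int)) 1).foldl
        (fun (c : List Int) (i : Int) => if PySem.List.pyGetD c i 0 == 0 then
            (PySem.List.pyRange i n i).foldl (fun c m => c.modify m.toNat (· + 1)) c
          else c) (List.replicate n.toNat 0)).length = n.toNat
  ∧ ∀ m : ℕ, ((PySem.List.pyRange 2 (2 + (K : Int)) 1).foldl
        (fun (c : List Int) (i : Int) => if PySem.List.pyGetD c i 0 == 0 then
            (PySem.List.pyRange i n i).foldl (fun c m => c.modify m.toNat (· + 1)) c
          else c) (List.replicate n.toNat 0)).getD m 0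
      = if 1 ≤ m ∧ m < n.toNat then ((pcount (2 + K) m : ℕ) : Int) else 0 := by
  have hN : ((n.toNat : Int)) = n := Int.toNat_of_nonneg (by omega)
  induction K with
  | zero =>
    rw [show ((2 : Int) + ((0 : ℕ) : Int)) = 2 by norm_num, PySem.List.pyRange_one_eq_nil le_rfl]
    refine ⟨by simp, fun m => ?_⟩
    simp only [List.foldl_nil, getD_replicate_zero]
    by_cases h : 1 ≤ m ∧ m < n.toNat <;> simp [h]
  | succ K ih =>
    obtain ⟨ihlen, ihget⟩ := ih (by push_cast at hK ⊢; omega)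
    rw [show ((2 : Int) + ((K + 1 : ℕ) : Int)) = (2 + (K : Int)) + 1 by push_cast; ring,
        PySem.List.pyRange_one_succ_right (by omega), List.foldl_append, List.foldl_cons,
        List.foldl_nil]
    have hidx : ((2 : Int) + (K : Int)) = ((2 + K : ℕ) : Int) := by push_cast; ring
    have hKN : 2 + K < n.toNat := by omega
    set C : List Int := (PySem.List.pyRange 2 (2 + (K : Int)) 1).foldl
        (fun (c : List Int) (i : Int) => if PySem.List.pyGetD c i 0 == 0 then
            (PySem.List.pyRange i n i).foldl (fun c m => c.modify m.toNat (· + 1)) c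
          else c) (List.replicate n.toNat 0) with hC
    have hcond : (PySem.List.pyGetD C ((2 : Int) + (K : Int)) 0 == 0)
        = decide (pcount (2 + K) (2 + K) = 0) := by
      rw [hidx, PySem.List.pyGetD_natCast, ihget (2 + K), if_pos ⟨by omega, hKN⟩]
      by_cases h : pcount (2 + K) (2 + K) = 0 <;> simp [h]
    rw [hcond]
    by_cases hp : (2 + K).Prime
    · have h0 : pcount (2 + K) (2 + K) = 0 := (pcount_zero_iff _ (by omega)).2 hp
      rw [h0, decide_eq_true rfl, if_pos rfl]
      have hnd : (PySem.List.pyRange ((2 : Int) + (K : Int)) n ((2 : Int) + (K : Int))).Nodup :=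
        nodup_pyRange_of_pos _ _ _ (by omega)
      have hpos : ∀ i ∈ PySem.List.pyRange ((2 : Int) + (K : Int)) n ((2 : Int) + (K : Int)), 0 ≤ i := by
        intro i hi
        rw [PySem.List.mem_pyRange_iff_of_pos (by omega)] at hi
        omega
      constructor
      · rw [foldl_length_inv _ (fun c t => List.length_modify ..)]
        exact ihlen
      · intro m
        rw [foldl_modify_getD _ hnd hpos, ihget m, ihlen]
        have hmem : ((m : Int) ∈ PySem.List.pyRange ((2 : Int) + (K : Int)) n ((2 : Int) + (K : Int)))
            ↔ ((2 + K) ∣ m ∧ 1 ≤ m ∧ m < n.toNat) := by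
          rw [PySem.List.mem_pyRange_iff_of_pos (by omega)]
          constructor
          · rintro ⟨h1, h2, h3⟩
            have hd : ((2 : Int) + (K : Int)) ∣ (m : Int) := by
              have := dvd_add h3 (dvd_refl ((2 : Int) + (K : Int)))
              simpa using this
            rw [hidx] at hd
            exact ⟨by exact_mod_cast hd, by omega, by omega⟩
          · rintro ⟨h1, h2, h3⟩
            have hle : 2 + K ≤ m := Nat.le_of_dvd (by omega) h1
            have hd : ((2 + K : ℕ) : Int) ∣ (m : Int) := Int.natCast_dvd_natCast.2 h1
            rw [← hidx] at hd
            exact ⟨by omega, by omega, dvd_sub hd (dvd_refl _)⟩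
        rw [show (2 + (K + 1)) = (2 + K) + 1 by ring, pcount_succ]
        by_cases hm : 1 ≤ m ∧ m < n.toNat
        · rw [if_pos hm, if_pos hm]
          by_cases hd : (2 + K) ∣ m
          · rw [if_pos (show ((m : Int) ∈ PySem.List.pyRange ((2 : Int) + (K : Int)) n
                  ((2 : Int) + (K : Int)) ∧ m < n.toNat) from ⟨hmem.2 ⟨hd, hm.1, hm.2⟩, hm.2⟩),
                if_pos (show Nat.Prime (2 + K) ∧ (2 + K) ∣ m from ⟨hp, hd⟩)]
            push_cast; ring
          · rw [if_neg (show ¬ ((m : Int) ∈ PySem.List.pyRange ((2 : Int) + (K : Int)) n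
                  ((2 : Int) + (K : Int)) ∧ m < n.toNat) from fun hc => hd (hmem.1 hc.1).1),
                if_neg (show ¬ (Nat.Prime (2 + K) ∧ (2 + K) ∣ m) from fun hc => hd hc.2)]
            push_cast; ring
        · rw [if_neg hm, if_neg hm,
              if_neg (show ¬ ((m : Int) ∈ PySem.List.pyRange ((2 : Int) + (K : Int)) n
                ((2 : Int) + (K : Int)) ∧ m < n.toNat) from
                  fun hc => hm ⟨(hmem.1 hc.1).2.1, (hmem.1 hc.1).2.2⟩)]
          ring
    · have h0 : pcount (2 + K) (2 + K) ≠ 0 := fun h => hp ((pcount_zero_iff _ (by omega)).1 h)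
      rw [decide_eq_false h0, if_neg (by simp)]
      refine ⟨ihlen, fun m => ?_⟩
      rw [ihget m, show (2 + (K + 1)) = (2 + K) + 1 by ring, pcount_succ,
          if_neg (show ¬ (Nat.Prime (2 + K) ∧ (2 + K) ∣ m) from fun hc => hp hc.1)]
      by_cases hm : 1 ≤ m ∧ m < n.toNat <;> simp [hm]

theorem portB_eq (n : Int) (hn : 2 ≤ n) :
    prime_power_sieve_alt n
      = ((List.range n.toNat).filter (fun k => decide ¬(k.primeFactors.card = 1))).map
          (fun k : ℕ => (k : Int)) := by
  have hN : ((n.toNat : Int)) = n := Int.toNat_of_nonneg (by omega)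
  have hKcast : ((((n - 2).toNat : ℕ) : Int)) = n - 2 := Int.toNat_of_nonneg (by omega)
  have hKeq : (2 : Int) + (((n - 2).toNat : ℕ) : Int) = n := by omega
  have hKnat : 2 + (n - 2).toNat = n.toNat := by omega
  obtain ⟨hlen, hget⟩ := cnt_fold n hn (n - 2).toNat (by omega)
  rw [hKeq] at hlen hget
  simp only [prime_power_sieve_alt]
  set CN : List Int := (PySem.List.pyRange 2 n 1).foldl
      (fun (c : List Int) (i : Int) => if PySem.List.pyGetD c i 0 == 0 then
          (PySem.List.pyRange i n i).foldl (fun c m => c.modify m.toNat (· + 1)) c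
        else c) (List.replicate n.toNat 0) with hCN
  rw [PySem.List.foldl_append_if_eq_filter]
  rw [PySem.List.pyRange_one]
  rw [List.filter_map]
  simp only [List.nil_append, Int.sub_zero, Function.comp_def, zero_add]
  refine congrArg _ (List.filter_congr ?_)
  intro k hk
  have hkN : k < n.toNat := List.mem_range.1 hk
  rw [PySem.List.pyGetD_natCast, hget k, hKnat]
  by_cases hk1 : 1 ≤ k
  · rw [if_pos ⟨hk1, hkN⟩, pcount_eq_card n.toNat k hk1 hkN]
    by_cases hc : k.primeFactors.card = 1 <;> simp [hc]
  · have hk0 : k = 0 := by omega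
    subst hk0
    simp

-- ===== VERDICT (by name: the statement is the Claim_ definition above) =====
theorem prime_power_sieve_spec : Claim_equal_prime_power_sieve := by
  intro n _ hPre
  unfold Spec_prime_power_sieve
  rw [portA_eq n hPre, portB_eq n hPre]
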